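-- pv_equiv track=rewrite | github.com/Nama21yo/Natnael_CP | Merry_Christmas.py | merry_christmas
-- ===== SOURCE A (Python) =====
-- def merry_christmas(n):
--     tasks = [1,2,4]
--     count = 0
--     for task in tasks:
--         if n >= task:
--             n -= task
--             count += 1
--         else:
--             break
--
--     return count
-- ===== SOURCE B (Python) =====
-- import bisect
--
-- def merry_christmas(n):
--     # count of cumulative thresholds 1, 3, 7 (prefix sums of 1,2,4) that are <= n
--     return bisect.bisect_right([1, 3, 7], n)
-- ===== Notes on version B (the rewrite author's own statement) =====
-- stated objective: simpler
-- what changed: Replaces the subtract-and-break loop with a bisect_right lookup into the precomputed cumulative-threshold table [1,3,7].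
import Mathlib
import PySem

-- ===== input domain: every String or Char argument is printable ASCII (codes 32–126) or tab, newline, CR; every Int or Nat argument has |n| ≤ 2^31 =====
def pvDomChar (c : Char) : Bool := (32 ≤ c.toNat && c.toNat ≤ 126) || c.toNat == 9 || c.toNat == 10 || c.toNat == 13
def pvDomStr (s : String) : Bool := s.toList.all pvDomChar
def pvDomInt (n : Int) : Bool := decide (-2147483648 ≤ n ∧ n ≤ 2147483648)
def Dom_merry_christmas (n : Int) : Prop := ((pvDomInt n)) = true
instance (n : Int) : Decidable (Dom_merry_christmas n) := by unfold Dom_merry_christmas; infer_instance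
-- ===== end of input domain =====

-- B replaces A's subtract-and-break loop by counting thresholds [1,3,7] ≤ n (bisect_right); objective: simpler.

-- ===== PORT A =====
-- loop over tasks with break: state = (n, count, broken)
def merryLoop (tasks : List Int) (n count : Int) : Int :=
  match tasks with
  | [] => count
  | task :: rest =>
    if n ≥ task then merryLoop rest (n - task) (count + 1)
    else count

def merry_christmas (n : Int) : Int := merryLoop [1, 2, 4] n 0

-- ===== PORT B =====
-- bisect_right([1,3,7], n) = number of elements of [1,3,7] that are ≤ n
def merry_christmas_alt (n : Int) : Int :=
  (([1, 3, 7] : List Int).countP (fun t => t ≤ n) : Int)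

-- ===== PRECONDITION & SPEC =====
def Spec_merry_christmas (n : Int) (out : Int) : Prop := out = merry_christmas_alt n
instance (n : Int) (out : Int) : Decidable (Spec_merry_christmas n out) := by unfold Spec_merry_christmas; infer_instance

-- ===== CLAIM (what is proved, stated in full; the proofs are below) =====
def Claim_equal_merry_christmas : Prop := ∀ (n : Int), Dom_merry_christmas n → Spec_merry_christmas n (merry_christmas n)

-- ===== LEMMAS AND PROOFS =====
theorem merry_eq (n : Int) : merry_christmas n = merry_christmas_alt n := by
  unfold merry_christmas merry_christmas_alt merryLoop
  simp only [List.countP]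
  by_cases h1 : (1 : Int) ≤ n <;> by_cases h2 : (3 : Int) ≤ n <;> by_cases h3 : (7 : Int) ≤ n <;>
    simp [merryLoop, List.countP.go, h1, h2, h3] <;> omega

-- ===== VERDICT (by name: the statement is the Claim_ definition above) =====
theorem merry_christmas_spec : Claim_equal_merry_christmas := by
  intro n _
  unfold Spec_merry_christmas
  exact merry_eq n
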